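-- pv_equiv track=rewrite | github.com/Kent27/hr-automation-hub | app/services/holiday_sync_service.py | _dedupe_category_entries
-- ===== SOURCE A (Python) =====
-- from typing import Dict, List, Optional, Protocol, Set
--
-- def _dedupe_category_entries(entries: List[Dict[str, str]]) -> List[Dict[str, str]]:
--     by_date: Dict[str, str] = {}
--     for item in entries:
--         iso_date = item["date"]
--         name = item["name"]
--         existing_name = by_date.get(iso_date)
--         if existing_name is None:
--             by_date[iso_date] = name
--             continue
--         if existing_name in {"Unnamed Holiday", "Hari Libur Nasional"} and name:
--             by_date[iso_date] = name
--     return [{"date": iso_date, "name": by_date[iso_date]} for iso_date in sorted(by_date)]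
-- ===== SOURCE B (Python) =====
-- def _dedupe_category_entries(entries):
--     pairs = [(item["date"], item["name"]) for item in entries]
--     out = []
--     for d in sorted({dd for dd, _ in pairs}):
--         name = None
--         for dd, n in pairs:
--             if dd != d:
--                 continue
--             if name is None:
--                 name = n
--             elif name in {"Unnamed Holiday", "Hari Libur Nasional"} and n:
--                 name = n
--         out.append({"date": d, "name": name})
--     return out
-- ===== Notes on version B (the rewrite author's own statement) =====
-- stated objective: alternative
-- what changed: B drops A's dict accumulator: it extracts the (date, name) pairs once, sorts the set of distinct dates, and resolves each date's name with a direct scan over the pairs applying the placeholder-overwrite rule.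
import Mathlib
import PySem

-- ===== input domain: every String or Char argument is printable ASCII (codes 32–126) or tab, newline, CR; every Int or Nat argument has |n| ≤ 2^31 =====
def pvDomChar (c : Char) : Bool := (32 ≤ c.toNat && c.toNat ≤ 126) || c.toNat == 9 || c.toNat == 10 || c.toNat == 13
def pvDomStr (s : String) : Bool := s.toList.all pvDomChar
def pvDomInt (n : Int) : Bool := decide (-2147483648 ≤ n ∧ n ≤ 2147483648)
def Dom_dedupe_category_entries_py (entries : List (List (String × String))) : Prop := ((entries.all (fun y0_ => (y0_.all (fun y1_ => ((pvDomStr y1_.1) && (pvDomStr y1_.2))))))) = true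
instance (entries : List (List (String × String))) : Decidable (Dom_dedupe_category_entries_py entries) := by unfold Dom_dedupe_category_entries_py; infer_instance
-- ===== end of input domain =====

-- B replaces A's dict-building fold by: sorted set of dates, then one resolving scan per date (alternative decomposition).
-- Pre_ excludes inputs on which A raises KeyError (an item missing the "date" or "name" key); B raises there too.

-- ===== PORT A =====
-- placeholder names (the set literal in both Pythons)
def pvPlaceholders : PySem.Set String := ["Unnamed Holiday", "Hari Libur Nasional"]

def dedupe_category_entries_py (entries : List (List (String × String))) : List (List (String × String)) :=
  let by_date : PySem.Dict String String := entries.foldl (fun d item =>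
    -- item["date"] / item["name"]: Pre_ guarantees the keys exist (else Python raises KeyError)
    let iso_date := ((PySem.Dict.mk item).get? "date").getD ""
    let name := ((PySem.Dict.mk item).get? "name").getD ""
    match d.get? iso_date with
    | none => d.insert iso_date name
    | some existing_name =>
      if pvPlaceholders.contains existing_name && name ≠ "" then d.insert iso_date name else d)
    PySem.Dict.empty
  (PySem.List.sorted by_date.keys (fun x => x) false).map
    (fun iso_date => [("date", iso_date), ("name", by_date.getD iso_date "")])

-- ===== PORT B =====
-- one step of B's inner name-resolution scan
def pvResolveStep (cur : Option String) (n : String) : Option String :=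
  match cur with
  | none => some n
  | some c => if pvPlaceholders.contains c && n ≠ "" then some n else some c

def dedupe_category_entries_py_alt (entries : List (List (String × String))) : List (List (String × String)) :=
  let pairs : List (String × String) := entries.map (fun item =>
    (((PySem.Dict.mk item).get? "date").getD "", ((PySem.Dict.mk item).get? "name").getD ""))
  (PySem.List.sorted (PySem.Set.ofList (pairs.map Prod.fst)) (fun x => x) false).map
    (fun d =>
      [("date", d),
       ("name", (pairs.foldl (fun cur p => if p.1 == d then pvResolveStep cur p.2 else cur) none).getD "")])

-- ===== PRECONDITION & SPEC =====
-- Pre_ excludes exactly the inputs on which A raises KeyError: an item without a "date" or "name" key.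
def Pre_dedupe_category_entries_py (entries : List (List (String × String))) : Prop :=
  entries.all (fun item => (PySem.Dict.mk item).contains "date" && (PySem.Dict.mk item).contains "name") = true
instance (entries : List (List (String × String))) : Decidable (Pre_dedupe_category_entries_py entries) := by unfold Pre_dedupe_category_entries_py; infer_instance

def pvWitness_dedupe_category_entries_py : (List (List (String × String))) :=
  [[("date", "2024-01-01"), ("name", "New Year")], [("date", "2024-01-01"), ("name", "X")]]

def Spec_dedupe_category_entries_py (entries : List (List (String × String))) (out : List (List (String × String))) : Prop := out = dedupe_category_entries_py_alt entries
instance (entries : List (List (String × String))) (out : List (List (String × String))) : Decidable (Spec_dedupe_category_entries_py entries out) := by unfold Spec_dedupe_category_entries_py; infer_instance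

-- ===== CLAIM (what is proved, stated in full; the proofs are below) =====
def Claim_equal_dedupe_category_entries_py : Prop := ∀ (entries : List (List (String × String))), Dom_dedupe_category_entries_py entries → Pre_dedupe_category_entries_py entries → Spec_dedupe_category_entries_py entries (dedupe_category_entries_py entries)

-- ===== LEMMAS AND PROOFS =====

-- A's loop body as a function of the extracted (date, name) pair
def pvStep (d : PySem.Dict String String) (p : String × String) : PySem.Dict String String :=
  match d.get? p.1 with
  | none => d.insert p.1 p.2
  | some existing_name =>
    if pvPlaceholders.contains existing_name && p.2 ≠ "" then d.insert p.1 p.2 else d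

theorem pvKeys_step (d : PySem.Dict String String) (p : String × String) :
    (pvStep d p).keys = PySem.Set.add d.keys p.1 := by
  unfold pvStep
  cases hg : d.get? p.1 with
  | none =>
    have hc : d.contains p.1 = false := by
      rw [PySem.Dict.contains_eq_isSome_get?, hg]; rfl
    have hmem : p.1 ∉ d.keys := by
      rw [PySem.Dict.contains_eq_decide_mem_keys] at hc; simpa using hc
    rw [PySem.Dict.keys_insert_of_not_contains d p.2 hc, PySem.Set.add_of_not_mem hmem]
  | some ex =>
    have hc : d.contains p.1 = true := by
      rw [PySem.Dict.contains_eq_isSome_get?, hg]; rfl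
    have hmem : p.1 ∈ d.keys := by
      rw [PySem.Dict.contains_eq_decide_mem_keys] at hc; simpa using hc
    rw [PySem.Set.add_of_mem hmem]
    split
    · exact PySem.Dict.keys_insert_of_contains d p.2 hc
    · split
      · exact PySem.Dict.keys_insert_of_contains d p.2 hc
      · rfl

theorem pvKeys_fold (pairs : List (String × String)) (d : PySem.Dict String String) :
    (pairs.foldl pvStep d).keys = PySem.Set.update d.keys (pairs.map Prod.fst) := by
  induction pairs generalizing d with
  | nil => simp [PySem.Set.update]
  | cons p rest ih =>
    simp only [List.foldl_cons, List.map_cons]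
    rw [ih, pvKeys_step]
    rfl

theorem pvGet_step_ne (d : PySem.Dict String String) (p : String × String) (k : String)
    (h : p.1 ≠ k) : (pvStep d p).get? k = d.get? k := by
  unfold pvStep
  cases hg : d.get? p.1 with
  | none => exact PySem.Dict.get?_insert_of_ne d p.2 (Ne.symm h)
  | some ex =>
    split
    · exact PySem.Dict.get?_insert_of_ne d p.2 (Ne.symm h)
    · split
      · exact PySem.Dict.get?_insert_of_ne d p.2 (Ne.symm h)
      · rfl

theorem pvGet_fold (pairs : List (String × String)) (d : PySem.Dict String String) (k : String) :
    (pairs.foldl pvStep d).get? k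
      = pairs.foldl (fun cur p => if p.1 == k then pvResolveStep cur p.2 else cur) (d.get? k) := by
  induction pairs generalizing d with
  | nil => rfl
  | cons p rest ih =>
    simp only [List.foldl_cons]
    rw [ih]
    congr 1
    by_cases hk : p.1 = k
    · subst hk
      simp only [beq_self_eq_true, if_true]
      unfold pvStep pvResolveStep
      cases hg : d.get? p.1 with
      | none => rw [PySem.Dict.get?_insert_self]
      | some ex =>
        split
        · rw [PySem.Dict.get?_insert_self]
        · next existing heq =>
          split
          · rw [PySem.Dict.get?_insert_self]
          · rw [hg]; exact heq
    · rw [if_neg (by simpa using hk), pvGet_step_ne d p k hk]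

-- A's fold over entries is the pairwise fold over the extracted (date, name) pairs
theorem pvFold_entries (entries : List (List (String × String))) :
    entries.foldl (fun d item =>
      let iso_date := ((PySem.Dict.mk item).get? "date").getD ""
      let name := ((PySem.Dict.mk item).get? "name").getD ""
      match d.get? iso_date with
      | none => d.insert iso_date name
      | some existing_name =>
        if pvPlaceholders.contains existing_name && name ≠ "" then d.insert iso_date name else d)
      PySem.Dict.empty
    = (entries.map (fun item =>
        (((PySem.Dict.mk item).get? "date").getD "", ((PySem.Dict.mk item).get? "name").getD ""))).foldl
        pvStep PySem.Dict.empty := by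
  rw [List.foldl_map]
  rfl

-- ===== VERDICT (by name: the statement is the Claim_ definition above) =====
theorem dedupe_category_entries_py_spec : Claim_equal_dedupe_category_entries_py := by
  intro entries _ _
  unfold Spec_dedupe_category_entries_py
  simp only [dedupe_category_entries_py, dedupe_category_entries_py_alt]
  rw [pvFold_entries]
  set pairs := entries.map (fun item =>
    (((PySem.Dict.mk item).get? "date").getD "", ((PySem.Dict.mk item).get? "name").getD "")) with hpairs
  rw [pvKeys_fold, PySem.Dict.keys_empty, PySem.Set.update_nil_left]
  apply List.map_congr_left
  intro k _
  have hget := pvGet_fold pairs PySem.Dict.empty k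
  rw [PySem.Dict.get?_empty] at hget
  rw [PySem.Dict.getD_eq_get?_getD, hget]
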